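-- pv_equiv track=rewrite | github.com/copenlu/nlp-book | _build/jupyter_execute/stat-nlp-book/chapters/language_models.py | inject_OOVs
-- ===== SOURCE A (Python) =====
-- OOV = '[OOV]'
--
-- def inject_OOVs(data):
--     """
--     Uses a heuristic to inject OOV symbols into a dataset.
--     Args:
--         data: the sequence of words to inject OOVs into.
--
--     Returns: the new sequence with OOV symbols injected.
--     """
--
--     seen = set()
--     result = []
--     for word in data:
--         if word in seen:
--             result.append(word)
--         else:
--             result.append(OOV)
--             seen.add(word)
--     return result
-- ===== SOURCE B (Python) =====
-- OOV = '[OOV]'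
--
-- def inject_OOVs(data):
--     first_idx = {}
--     for i, word in enumerate(data):
--         first_idx.setdefault(word, i)
--     return [OOV if first_idx[word] == i else word for i, word in enumerate(data)]
-- ===== Notes on version B (the rewrite author's own statement) =====
-- stated objective: alternative
-- what changed: Two-pass decomposition: first build a dict of each word's first-occurrence index with setdefault, then emit OOV exactly at those indices via a comprehension, instead of growing a seen-set while emitting in one pass.
import Mathlib
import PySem

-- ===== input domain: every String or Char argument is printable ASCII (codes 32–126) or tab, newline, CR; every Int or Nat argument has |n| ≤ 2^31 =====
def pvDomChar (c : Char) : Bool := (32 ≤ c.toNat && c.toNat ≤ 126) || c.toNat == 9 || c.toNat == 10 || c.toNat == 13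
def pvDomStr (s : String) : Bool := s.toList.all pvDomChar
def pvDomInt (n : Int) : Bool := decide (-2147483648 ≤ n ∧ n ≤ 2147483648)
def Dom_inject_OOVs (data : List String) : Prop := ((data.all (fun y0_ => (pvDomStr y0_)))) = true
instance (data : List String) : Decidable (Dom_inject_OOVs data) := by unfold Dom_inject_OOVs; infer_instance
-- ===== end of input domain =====

-- B replaces A's one-pass seen-set loop by a two-pass decomposition (first-occurrence index dict, then a map); objective: alternative, same cost.

-- ===== PORT A =====
def inject_OOVs (data : List String) : List String :=
  (data.foldl
    (fun (st : PySem.Set String × List String) word =>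
      if PySem.Set.contains st.1 word then (st.1, st.2 ++ [word])
      else (PySem.Set.add st.1 word, st.2 ++ ["[OOV]"]))
    (PySem.Set.empty, [])).2

-- ===== PORT B =====
def inject_OOVs_alt (data : List String) : List String :=
  let first_idx : PySem.Dict String Int :=
    (PySem.List.enumerate data 0).foldl
      (fun d p => PySem.Dict.setdefault d p.2 p.1) PySem.Dict.empty
  (PySem.List.enumerate data 0).map
    (fun p => if first_idx.get? p.2 = some p.1 then "[OOV]" else p.2)

-- ===== PRECONDITION & SPEC =====
def Spec_inject_OOVs (data : List String) (out : List String) : Prop := out = inject_OOVs_alt data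
instance (data : List String) (out : List String) : Decidable (Spec_inject_OOVs data out) := by unfold Spec_inject_OOVs; infer_instance

-- ===== CLAIM (what is proved, stated in full; the proofs are below) =====
def Claim_equal_inject_OOVs : Prop := ∀ (data : List String), Dom_inject_OOVs data → Spec_inject_OOVs data (inject_OOVs data)

-- ===== LEMMAS AND PROOFS =====

/-- A's loop body as structural recursion on the remaining words, given the seen-set. -/
def goA (s : PySem.Set String) : List String → List String
  | [] => []
  | w :: ws =>
      if w ∈ s then w :: goA s ws
      else "[OOV]" :: goA (PySem.Set.add s w) ws

/-- Index (offset by k) of the first occurrence of w. -/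
def fIdx? (w : String) (k : Int) : List String → Option Int
  | [] => none
  | x :: xs => if x = w then some k else fIdx? w (k + 1) xs

theorem lemA (ws : List String) : ∀ (s : PySem.Set String) (r : List String),
    (ws.foldl
      (fun (st : PySem.Set String × List String) word =>
        if PySem.Set.contains st.1 word then (st.1, st.2 ++ [word])
        else (PySem.Set.add st.1 word, st.2 ++ ["[OOV]"]))
      (s, r)).2 = r ++ goA s ws := by
  induction ws with
  | nil => simp [goA]
  | cons w ws ih =>
    intro s r
    simp only [List.foldl_cons]
    by_cases h : w ∈ s
    · rw [if_pos ((PySem.Set.contains_iff s w).mpr h), ih]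
      simp [goA, h]
    · rw [if_neg (fun hc => h ((PySem.Set.contains_iff s w).mp hc)), ih]
      simp [goA, h]

theorem lemFi (ws : List String) : ∀ (k : Int) (d : PySem.Dict String Int) (w : String),
    ((PySem.List.enumerate ws k).foldl
      (fun d p => PySem.Dict.setdefault d p.2 p.1) d).get? w
    = if d.contains w then d.get? w else fIdx? w k ws := by
  induction ws with
  | nil =>
    intro k d w
    simp only [PySem.List.enumerate_nil, List.foldl_nil, fIdx?]
    by_cases hw : d.contains w
    · simp [hw]
    · simp only [hw, Bool.false_eq_true, if_false]
      exact (PySem.Dict.get?_eq_none_iff_contains d w).mpr (by simpa using hw)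
  | cons x xs ih =>
    intro k d w
    rw [PySem.List.enumerate_cons]
    simp only [List.foldl_cons]
    by_cases hc : d.contains x
    · rw [PySem.Dict.setdefault_of_contains d k hc, ih]
      by_cases hw : d.contains w
      · simp [hw]
      · have hne : x ≠ w := by rintro rfl; exact hw hc
        simp [hw, fIdx?, hne]
    · rw [PySem.Dict.setdefault_of_not_contains d k (by simpa using hc), ih]
      by_cases hwx : w = x
      · subst hwx
        simp [PySem.Dict.contains_insert_self, PySem.Dict.get?_insert_self,
          (by simpa using hc : d.contains w = false), fIdx?]
      · have h1 : (d.insert x k).contains w = d.contains w := by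
          rw [PySem.Dict.contains_insert]
          simp [hwx]
        rw [h1]
        by_cases hw : d.contains w
        · simp only [hw, if_true]
          rw [PySem.Dict.get?_insert]
          simp [hwx]
        · have hxw : x ≠ w := fun hh => hwx hh.symm
          simp [hw, fIdx?, hxw]

theorem fIdx_mem (w : String) (pre : List String) (h : w ∈ pre) :
    ∀ (k : Int) (rest : List String), ∃ j, fIdx? w k (pre ++ rest) = some j ∧ j < k + pre.length := by
  induction pre with
  | nil => cases h
  | cons x xs ih =>
    intro k rest
    by_cases hx : x = w
    · refine ⟨k, by simp [fIdx?, hx], ?_⟩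
      simp only [List.length_cons]
      push_cast
      omega
    · have hm : w ∈ xs := by
        cases h with
        | head => exact absurd rfl hx
        | tail _ h' => exact h'
      obtain ⟨j, hj, hjlt⟩ := ih hm (k + 1) rest
      refine ⟨j, by simpa [fIdx?, hx] using hj, ?_⟩
      simp only [List.length_cons] at *
      push_cast at *
      omega

theorem fIdx_not_mem (w : String) (pre : List String) (h : w ∉ pre) :
    ∀ (k : Int) (ws : List String), fIdx? w k (pre ++ w :: ws) = some (k + pre.length) := by
  induction pre with
  | nil => intro k ws; simp [fIdx?]
  | cons x xs ih =>
    intro k ws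
    have hx : x ≠ w := fun hh => h (by simp [hh])
    have hm : w ∉ xs := fun hh => h (by simp [hh])
    rw [List.cons_append, fIdx?, if_neg hx, ih hm]
    congr 1
    simp only [List.length_cons]
    push_cast
    ring

theorem lemMain (rest : List String) : ∀ (pre : List String),
    goA (PySem.Set.ofList pre) rest =
    (PySem.List.enumerate rest (pre.length : Int)).map
      (fun p => if fIdx? p.2 0 (pre ++ rest) = some p.1 then "[OOV]" else p.2) := by
  induction rest with
  | nil => intro pre; simp [goA, PySem.List.enumerate_nil]
  | cons w ws ih =>
    intro pre
    rw [PySem.List.enumerate_cons]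
    have hmap :
        (PySem.List.enumerate ws ((pre.length : Int) + 1)).map
          (fun p => if fIdx? p.2 0 (pre ++ w :: ws) = some p.1 then "[OOV]" else p.2)
        = goA (PySem.Set.ofList (pre ++ [w])) ws := by
      rw [ih (pre ++ [w])]
      have hlen : (((pre ++ [w]).length : Nat) : Int) = (pre.length : Int) + 1 := by
        simp
      have hlist : (pre ++ [w]) ++ ws = pre ++ w :: ws := by simp
      rw [hlen, hlist]
    by_cases h : w ∈ pre
    · -- w already seen: A keeps it; B's first index of w is < pre.length
      have hmem : w ∈ PySem.Set.ofList pre := (PySem.Set.mem_ofList pre w).mpr h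
      obtain ⟨j, hj, hjlt⟩ := fIdx_mem w pre h 0 (w :: ws)
      have hne : fIdx? w 0 (pre ++ w :: ws) ≠ some (pre.length : Int) := by
        rw [hj]; intro hcon; simp at hcon; omega
      have hadd : PySem.Set.ofList (pre ++ [w]) = PySem.Set.ofList pre := by
        rw [PySem.Set.ofList_append_singleton, PySem.Set.add_of_mem hmem]
      simp only [goA, hmem, if_true, List.map_cons, hne, if_false]
      rw [← hadd]
      exact congrArg (List.cons w) hmap.symm
    · -- w unseen: A emits OOV; B's first index of w is exactly pre.length
      have hmem : w ∉ PySem.Set.ofList pre := fun hc => h ((PySem.Set.mem_ofList pre w).mp hc)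
      have hfi : fIdx? w 0 (pre ++ w :: ws) = some (pre.length : Int) := by
        simpa using fIdx_not_mem w pre h 0 ws
      have hadd : PySem.Set.add (PySem.Set.ofList pre) w = PySem.Set.ofList (pre ++ [w]) :=
        (PySem.Set.ofList_append_singleton pre w).symm
      simp only [goA, hmem, if_false, List.map_cons, hfi, if_true]
      rw [hadd]
      exact congrArg (List.cons "[OOV]") hmap.symm

-- ===== VERDICT (by name: the statement is the Claim_ definition above) =====
theorem inject_OOVs_spec : Claim_equal_inject_OOVs := by
  intro data _
  unfold Spec_inject_OOVs inject_OOVs inject_OOVs_alt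
  rw [lemA data PySem.Set.empty []]
  simp only [List.nil_append]
  have hfi : ∀ w, ((PySem.List.enumerate data 0).foldl
      (fun d p => PySem.Dict.setdefault d p.2 p.1) PySem.Dict.empty).get? w
      = fIdx? w 0 data := by
    intro w
    rw [lemFi data 0 PySem.Dict.empty w]
    simp [PySem.Dict.contains_empty]
  have hemp : PySem.Set.empty = PySem.Set.ofList ([] : List String) := rfl
  rw [hemp, lemMain data []]
  simp only [List.length_nil, Int.natCast_zero, List.nil_append]
  simp only [hfi]
  rfl
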